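-- pv_equiv track=rewrite | github.com/Betti-Labs/rsac-collapse-engine | src/rsac/collapse.py | symbolic_reduction_loop
-- ===== SOURCE A (Python) =====
-- def digital_root(n: int) -> int:
--     return n if n == 0 else 9 if n % 9 == 0 else n % 9
--
-- def symbolic_reduction_loop(data, depth=16):
--     history = [data.copy()]
--     current = data.copy()
--     for _ in range(depth):
--         if len(current) < 2:
--             break
--         reduced = [digital_root(current[i] + current[i+1]) for i in range(len(current)-1)]
--         current = reduced
--         history.append(current.copy())
--     return history
-- ===== SOURCE B (Python) =====
-- def digital_root(n: int) -> int:
--     return n if n == 0 else 9 if n % 9 == 0 else n % 9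
--
-- def symbolic_reduction_loop(data, depth=16):
--     def build(row, d):
--         if d <= 0 or len(row) < 2:
--             return [row.copy()]
--         nxt = [digital_root(row[i] + row[i + 1]) for i in range(len(row) - 1)]
--         return [row.copy()] + build(nxt, d - 1)
--     return build(data, depth)
-- ===== Notes on version B (the rewrite author's own statement) =====
-- stated objective: alternative
-- what changed: The iterative loop with a growing history accumulator is replaced by a structural recursion on the collapsing row that builds the history front-to-back by consing the current level onto the recursively built rest.
import Mathlib
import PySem

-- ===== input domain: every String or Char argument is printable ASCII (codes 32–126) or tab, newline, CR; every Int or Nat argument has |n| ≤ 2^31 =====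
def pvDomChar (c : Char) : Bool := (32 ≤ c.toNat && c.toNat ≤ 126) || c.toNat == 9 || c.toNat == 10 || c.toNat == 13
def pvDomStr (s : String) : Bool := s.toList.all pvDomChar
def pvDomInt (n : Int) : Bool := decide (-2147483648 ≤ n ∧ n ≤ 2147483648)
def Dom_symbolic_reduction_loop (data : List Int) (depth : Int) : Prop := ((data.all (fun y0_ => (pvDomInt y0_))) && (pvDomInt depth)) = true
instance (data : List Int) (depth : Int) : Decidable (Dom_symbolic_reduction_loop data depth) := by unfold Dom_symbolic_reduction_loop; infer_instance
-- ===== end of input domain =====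

-- B replaces A's iterative accumulator loop with a structural recursion consing each
-- level onto the recursively built rest (objective: alternative decomposition; same
-- return value; neither version mutates its argument).

-- ===== PORT A =====
-- shared helper: digital_root (identical source in A and B); PySem.Int.mod is Python's %
def digital_root (n : Int) : Int :=
  if n = 0 then n else if PySem.Int.mod n 9 = 0 then 9 else PySem.Int.mod n 9

-- the 'for _ in range(depth)' loop with break; fuel = depth.toNat (range(d) is empty for d ≤ 0)
def srlLoopA : Nat → List (List Int) → List Int → List (List Int)
  | 0, history, _ => history
  | fuel + 1, history, current =>
    if current.length < 2 then history
    else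
      -- indices i, i+1 are in range, so getD never hits its default
      let reduced := (List.range (current.length - 1)).map
        (fun i => digital_root (current.getD i 0 + current.getD (i + 1) 0))
      srlLoopA fuel (history ++ [reduced]) reduced

def symbolic_reduction_loop (data : List Int) (depth : Int) : List (List Int) :=
  srlLoopA depth.toNat [data] data

-- ===== PORT B =====
-- recursive build(row, d): base when d ≤ 0 or len(row) < 2 (d as Nat fuel: 0 ↔ d ≤ 0)
def srlBuild : List Int → Nat → List (List Int)
  | row, 0 => [row]
  | row, d + 1 =>
    if row.length < 2 then [row]
    else
      let nxt := (List.range (row.length - 1)).map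
        (fun i => digital_root (row.getD i 0 + row.getD (i + 1) 0))
      row :: srlBuild nxt d

def symbolic_reduction_loop_alt (data : List Int) (depth : Int) : List (List Int) :=
  srlBuild data depth.toNat

-- ===== PRECONDITION & SPEC =====
def Spec_symbolic_reduction_loop (data : List Int) (depth : Int) (out : List (List Int)) : Prop := out = symbolic_reduction_loop_alt data depth
instance (data : List Int) (depth : Int) (out : List (List Int)) : Decidable (Spec_symbolic_reduction_loop data depth out) := by unfold Spec_symbolic_reduction_loop; infer_instance

-- ===== CLAIM (what is proved, stated in full; the proofs are below) =====
def Claim_equal_symbolic_reduction_loop : Prop := ∀ (data : List Int) (depth : Int), Dom_symbolic_reduction_loop data depth → Spec_symbolic_reduction_loop data depth (symbolic_reduction_loop data depth)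

-- ===== LEMMAS AND PROOFS =====

lemma srlLoopA_eq_build (n : Nat) : ∀ (h : List (List Int)) (c : List Int),
    srlLoopA n (h ++ [c]) c = h ++ srlBuild c n := by
  induction n with
  | zero => intro h c; simp [srlLoopA, srlBuild]
  | succ n ih =>
    intro h c
    simp only [srlLoopA, srlBuild]
    split
    · rfl
    · have := ih (h ++ [c]) ((List.range (c.length - 1)).map
        (fun i => digital_root (c.getD i 0 + c.getD (i + 1) 0)))
      simpa using this

-- ===== VERDICT (by name: the statement is the Claim_ definition above) =====
theorem symbolic_reduction_loop_spec : Claim_equal_symbolic_reduction_loop := by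
  intro data depth _
  show _ = _
  have := srlLoopA_eq_build depth.toNat [] data
  simpa [symbolic_reduction_loop, symbolic_reduction_loop_alt] using this
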